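-- pv_equiv track=rewrite | github.com/lwy0ever/hackerrank | Mandragora Forest.py | mandragora
-- ===== SOURCE A (Python) =====
-- def mandragora(H):
--     n = len(H)
--     H.sort()
--     total = sum(H)
--     ans = 0
--     for i in range(n):
--         t = (1 + i) * total
--         if t > ans:
--             ans = t
--         else:
--             break
--         total -= H[i]
--     return ans
-- ===== SOURCE B (Python) =====
-- def mandragora(H):
--     # Two-phase: build the suffix-sum table of sorted H, list the candidate
--     # experiences vals[i] = (i+1)*sum(H[i:]), then locate the break point
--     # (first non-increase of the 0-prefixed chain) and index the table.
--     H.sort()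
--     suf = []
--     s = 0
--     for h in reversed(H):
--         s += h
--         suf.append(s)
--     suf.reverse()
--     vals = [(i + 1) * s for i, s in enumerate(suf)]
--     k = len(vals)
--     for j, (p, v) in enumerate(zip([0] + vals, vals)):
--         if v <= p:
--             k = j
--             break
--     return vals[k - 1] if k else 0
-- ===== Notes on version B (the rewrite author's own statement) =====
-- stated objective: alternative
-- what changed: A's single fused loop that maintains a running total, running max and early break is replaced by a pipeline: build the suffix-sum table of the sorted list, form the candidate list vals[i]=(i+1)*S_i by a comprehension, locate the break point by scanning adjacent pairs of the 0-prefixed chain, and index the table once.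
import Mathlib
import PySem

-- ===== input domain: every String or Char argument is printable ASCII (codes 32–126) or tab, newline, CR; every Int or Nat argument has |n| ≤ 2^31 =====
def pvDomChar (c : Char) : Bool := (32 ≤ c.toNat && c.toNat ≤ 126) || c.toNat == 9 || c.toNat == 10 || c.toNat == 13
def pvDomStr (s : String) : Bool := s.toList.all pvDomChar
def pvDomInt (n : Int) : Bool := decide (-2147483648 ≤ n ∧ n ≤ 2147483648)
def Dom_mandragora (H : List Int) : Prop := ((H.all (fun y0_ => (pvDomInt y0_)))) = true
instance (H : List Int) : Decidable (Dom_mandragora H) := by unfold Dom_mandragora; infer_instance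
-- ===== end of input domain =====

-- B replaces A's fused running-total loop by a suffix-sum table, a candidate list and a
-- separate break-point search (objective: alternative decomposition, same cost).
-- Both A and B sort the argument list in place in Python; the equivalence proved here
-- is about the RETURN value (B performs the same mutation).

-- ===== PORT A =====
-- 'for i in range(n)' walking H[i] front to back, with the early 'break'
def mandragoraLoop : List Int → Int → Int → Int → Int
  | [], _, _, ans => ans
  | h :: rest, i, total, ans =>
      let t := (1 + i) * total
      if t > ans then mandragoraLoop rest (i + 1) (total - h) t
      else ans

def mandragora (H : List Int) : Int :=
  let Hs := PySem.List.sorted H (fun x => x) false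
  mandragoraLoop Hs 0 Hs.sum 0

-- ===== PORT B =====
-- the 'for j, (p, v) in enumerate(zip([0] + vals, vals))' search for the break index
def findBreak : List (Int × Int) → Nat → Nat → Nat
  | [], _, k => k
  | (p, v) :: rest, j, k => if v ≤ p then j else findBreak rest (j + 1) k

def mandragora_alt (H : List Int) : Int :=
  let Hs := PySem.List.sorted H (fun x => x) false
  -- suffix-sum table: accumulate over reversed(Hs), then reverse
  let suf := ((Hs.reverse.foldl (fun (acc : List Int × Int) h =>
      let s := acc.2 + h
      (acc.1 ++ [s], s)) ([], 0)).1).reverse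
  let vals := (PySem.List.enumerate suf 0).map (fun p => (p.1 + 1) * p.2)
  let k := findBreak ((0 :: vals).zip vals) 0 vals.length
  if k = 0 then 0 else (PySem.List.pyGet? vals ((k : Int) - 1)).getD 0

-- ===== PRECONDITION & SPEC =====
def Spec_mandragora (H : List Int) (out : Int) : Prop := out = mandragora_alt H
instance (H : List Int) (out : Int) : Decidable (Spec_mandragora H out) := by unfold Spec_mandragora; infer_instance

-- ===== CLAIM (what is proved, stated in full; the proofs are below) =====
def Claim_equal_mandragora : Prop := ∀ (H : List Int), Dom_mandragora H → Spec_mandragora H (mandragora H)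

-- ===== LEMMAS AND PROOFS =====

-- common spec: scan the candidate list, keep going while strictly increasing
def specV : List Int → Int → Int
  | [], ans => ans
  | v :: rest, ans => if v > ans then specV rest v else ans

-- candidate values (1+i)*sum(l[j:]) relative to start index i
def valsFrom : List Int → Int → List Int
  | [], _ => []
  | h :: t, i => (1 + i) * (h + t.sum) :: valsFrom t (i + 1)

-- running partial sums starting from s
def psums : Int → List Int → List Int
  | _, [] => []
  | s, h :: t => (s + h) :: psums (s + h) t

-- suffix sums of l, each shifted by s
def sufOff : Int → List Int → List Int
  | _, [] => []
  | s, h :: t => (s + (h + t.sum)) :: sufOff s t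

theorem loopA_eq_specV (l : List Int) :
    ∀ (i ans : Int), mandragoraLoop l i l.sum ans = specV (valsFrom l i) ans := by
  induction l with
  | nil => intro i ans; simp [mandragoraLoop, valsFrom, specV]
  | cons h t ih =>
      intro i ans
      simp only [mandragoraLoop, valsFrom, specV, List.sum_cons]
      have e1 : h + t.sum - h = t.sum := by ring
      split_ifs with hgt
      · rw [e1, ih]
      · rfl

theorem fold_eq_psums (L : List Int) :
    ∀ (A : List Int) (s : Int),
      L.foldl (fun (acc : List Int × Int) h =>
        let s := acc.2 + h
        (acc.1 ++ [s], s)) (A, s) = (A ++ psums s L, s + L.sum) := by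
  induction L with
  | nil => intro A s; simp [psums]
  | cons h t ih =>
      intro A s
      simp only [List.foldl_cons, psums, List.sum_cons]
      rw [ih]
      rw [Prod.mk.injEq]
      refine ⟨by simp, by ring⟩

theorem psums_append (X : List Int) :
    ∀ (Y : List Int) (s : Int), psums s (X ++ Y) = psums s X ++ psums (s + X.sum) Y := by
  induction X with
  | nil => intro Y s; simp [psums]
  | cons h t ih =>
      intro Y s
      simp only [List.cons_append, psums, List.sum_cons, ih]
      have : s + h + t.sum = s + (h + t.sum) := by ring
      rw [this]

theorem psums_reverse_reverse (L : List Int) :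
    ∀ (s : Int), (psums s L.reverse).reverse = sufOff s L := by
  induction L with
  | nil => intro s; simp [psums, sufOff]
  | cons h t ih =>
      intro s
      have : (h :: t).reverse = t.reverse ++ [h] := by simp
      rw [this, psums_append]
      simp only [psums, List.reverse_append, List.reverse_cons, List.reverse_nil,
        List.nil_append, List.sum_reverse, sufOff, List.cons_append]
      rw [ih]
      have : s + t.sum + h = s + (h + t.sum) := by ring
      rw [this]

theorem enumerate_sufOff (L : List Int) :
    ∀ (i : Int), (PySem.List.enumerate (sufOff 0 L) i).map (fun p => (p.1 + 1) * p.2)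
      = valsFrom L i := by
  induction L with
  | nil => intro i; simp [sufOff, PySem.List.enumerate_nil, valsFrom]
  | cons h t ih =>
      intro i
      simp only [sufOff, PySem.List.enumerate_cons, List.map_cons, valsFrom, ih]
      have : (i + 1) * (0 + (h + t.sum)) = (1 + i) * (h + t.sum) := by ring
      rw [this]

theorem findBreak_spec (vs : List Int) :
    ∀ (full : List Int) (j : Nat) (prev : Int),
      full.drop j = vs →
      (j = 0 → prev = 0) →
      (0 < j → full[j - 1]? = some prev) →
      (let k := findBreak ((prev :: vs).zip vs) j full.length
       if k = 0 then 0 else (PySem.List.pyGet? full ((k : Int) - 1)).getD 0)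
        = specV vs prev := by
  induction vs with
  | nil =>
      intro full j prev hdrop h0 hprev
      have hlen : full.length ≤ j := by
        have := congrArg List.length hdrop
        simp at this; omega
      simp only [List.zip_nil_right, findBreak, specV]
      by_cases hfl : full.length = 0
      · simp only [hfl]
        rcases Nat.eq_zero_or_pos j with hj | hj
        · exact (h0 hj).symm
        · have := hprev hj
          rw [List.getElem?_eq_none (by omega)] at this
          exact absurd this (by simp)
      · rw [if_neg hfl]
        have hj : 0 < j := by omega
        have hget := hprev hj
        have hjlt : j - 1 < full.length := by
          by_contra hge
          rw [List.getElem?_eq_none (by omega)] at hget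
          exact absurd hget (by simp)
        have hje : j = full.length := by omega
        have hc : ((full.length : Int) - 1) = ((full.length - 1 : Nat) : Int) := by
          push_cast [Nat.cast_sub (by omega : 1 ≤ full.length)]; ring
        rw [hc, PySem.List.pyGet?_natCast]
        rw [hje] at hget
        rw [hget]; rfl
  | cons v rest ih =>
      intro full j prev hdrop h0 hprev
      simp only [List.zip_cons_cons, findBreak]
      by_cases hle : v ≤ prev
      · rw [if_pos hle]
        simp only [specV, if_neg (by omega : ¬ v > prev)]
        by_cases hj : j = 0
        · simp [hj, (h0 hj).symm]
        · rw [if_neg hj]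
          have hget := hprev (by omega)
          have hjlt : j - 1 < full.length := by
            by_contra hge
            rw [List.getElem?_eq_none (by omega)] at hget
            exact absurd hget (by simp)
          have hc : ((j : Int) - 1) = ((j - 1 : Nat) : Int) := by
            push_cast [Nat.cast_sub (by omega : 1 ≤ j)]; ring
          rw [hc, PySem.List.pyGet?_natCast, hget]; rfl
      · rw [if_neg hle]
        simp only [specV, if_pos (by omega : v > prev)]
        refine ih full (j + 1) v ?_ (by omega) ?_
        · have : full.drop (j + 1) = (full.drop j).drop 1 := by
            rw [List.drop_drop]
          rw [this, hdrop]; rfl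
        · intro _
          have hv : full[j]? = some v := by
            have h2 : (full.drop j)[0]? = some v := by rw [hdrop]; rfl
            rw [List.getElem?_drop] at h2; simpa using h2
          simpa using hv

theorem both_eq (L : List Int) :
    mandragoraLoop L 0 L.sum 0 =
      (let suf := ((L.reverse.foldl (fun (acc : List Int × Int) h =>
          let s := acc.2 + h
          (acc.1 ++ [s], s)) ([], 0)).1).reverse
       let vals := (PySem.List.enumerate suf 0).map (fun p => (p.1 + 1) * p.2)
       let k := findBreak ((0 :: vals).zip vals) 0 vals.length
       if k = 0 then 0 else (PySem.List.pyGet? vals ((k : Int) - 1)).getD 0) := by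
  have hsuf : ((L.reverse.foldl (fun (acc : List Int × Int) h =>
      let s := acc.2 + h
      (acc.1 ++ [s], s)) ([], 0)).1).reverse = sufOff 0 L := by
    rw [fold_eq_psums]
    simp only [List.nil_append]
    exact psums_reverse_reverse L 0
  simp only [hsuf, enumerate_sufOff]
  rw [loopA_eq_specV]
  exact (findBreak_spec (valsFrom L 0) (valsFrom L 0) 0 0 rfl (fun _ => rfl)
    (by omega)).symm

-- ===== VERDICT (by name: the statement is the Claim_ definition above) =====
theorem mandragora_spec : Claim_equal_mandragora := by
  intro H _
  unfold Spec_mandragora mandragora mandragora_alt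
  exact both_eq (PySem.List.sorted H (fun x => x) false)
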